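-- pv_equiv track=rewrite | github.com/thealeksandrsheykin/commander_shepard | block01_easy/block01_easy.py | easy
-- ===== SOURCE A (Python) =====
-- def easy(text: str, number: int) -> str:
--     """
--     The function converts the string
--     :param text: original string
--     :param number: the number of repetitions original string in the result
--     :return: original string multiplied by number in different case
--     """
--     result = ''
--     for i in range(number):
--         if i % 2 == 1:
--             result += text.upper()
--         else:
--             result += text
--     return result
-- ===== SOURCE B (Python) =====
-- def easy(text: str, number: int) -> str:
--     n = max(number, 0)
--     pair = text + text.upper()
--     return pair * (n // 2) + (text if n % 2 == 1 else '')
-- ===== Notes on version B (the rewrite author's own statement) =====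
-- stated objective: simpler
-- what changed: Replaces the per-iteration loop with a modulo branch by one closed-form concatenation: (text + text.upper()) repeated n//2 times plus text if n is odd (n clamped at 0 to match empty output on non-positive counts).
import Mathlib
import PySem

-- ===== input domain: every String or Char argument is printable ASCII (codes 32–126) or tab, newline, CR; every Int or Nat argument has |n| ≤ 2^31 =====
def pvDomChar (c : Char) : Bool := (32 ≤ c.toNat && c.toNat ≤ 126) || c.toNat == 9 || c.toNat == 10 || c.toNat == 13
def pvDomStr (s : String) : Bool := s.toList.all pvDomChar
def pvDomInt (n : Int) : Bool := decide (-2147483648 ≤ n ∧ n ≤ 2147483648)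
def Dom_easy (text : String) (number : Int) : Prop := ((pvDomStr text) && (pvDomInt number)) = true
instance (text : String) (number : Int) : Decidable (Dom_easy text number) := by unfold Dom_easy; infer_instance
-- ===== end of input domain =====

-- B replaces A's loop (append text / text.upper() per iteration) by one closed-form
-- concatenation: (text + text.upper()) * (n // 2) plus a final text when n is odd.

-- ===== PORT A =====
-- result = ''; for i in range(number): result += text.upper() if i % 2 == 1 else text
def easy (text : String) (number : Int) : String :=
  String.ofList <|
    (PySem.List.pyRange 0 number 1).foldl
      (fun result i =>
        if PySem.Int.mod i 2 == 1 then result ++ PySem.Chars.upper text.toList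
        else result ++ text.toList)
      []

-- ===== PORT B =====
-- n = max(number, 0); pair = text + text.upper(); return pair * (n // 2) + (text if n % 2 == 1 else '')
def easy_alt (text : String) (number : Int) : String :=
  let n := max number 0
  let pair := text.toList ++ PySem.Chars.upper text.toList
  String.ofList <|
    PySem.List.pyRepeat pair (PySem.Int.floordiv n 2) ++
      (if PySem.Int.mod n 2 == 1 then text.toList else [])

-- ===== PRECONDITION & SPEC =====
def Spec_easy (text : String) (number : Int) (out : String) : Prop := out = easy_alt text number
instance (text : String) (number : Int) (out : String) : Decidable (Spec_easy text number out) := by unfold Spec_easy; infer_instance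

-- ===== CLAIM (what is proved, stated in full; the proofs are below) =====
def Claim_equal_easy : Prop := ∀ (text : String) (number : Int), Dom_easy text number → Spec_easy text number (easy text number)

-- ===== LEMMAS AND PROOFS =====

-- A's loop over range(n), characterised in closed form (Nat count).
theorem easy_loop (t : List Char) (n : Nat) :
    (PySem.List.pyRange 0 (n : Int) 1).foldl
      (fun result i =>
        if PySem.Int.mod i 2 == 1 then result ++ PySem.Chars.upper t
        else result ++ t)
      []
    = (List.replicate (n / 2) (t ++ PySem.Chars.upper t)).flatten ++
        (if n % 2 == 1 then t else []) := by
  induction n with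
  | zero => simp [PySem.List.pyRange_one_eq_nil]
  | succ m ih =>
    have h : ((m : Int) + 1) = ((m + 1 : Nat) : Int) := by push_cast; ring
    rw [← h, PySem.List.pyRange_one_succ_right (by positivity), List.foldl_append, ih]
    have hmod : PySem.Int.mod (m : Int) 2 = ((m % 2 : Nat) : Int) :=
      PySem.Int.mod_natCast m 2
    rcases Nat.even_or_odd m with he | ho
    · have h2 : m % 2 = 0 := Nat.even_iff.mp he
      have h2' : (m + 1) % 2 = 1 := by omega
      have hdiv : (m + 1) / 2 = m / 2 := by omega
      simp [h2, h2', hdiv]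
      intro hc; exfalso; omega
    · have h2 : m % 2 = 1 := Nat.odd_iff.mp ho
      have h2' : (m + 1) % 2 = 0 := by omega
      have hdiv : (m + 1) / 2 = m / 2 + 1 := by omega
      simp [h2, h2', hdiv, List.replicate_succ', List.flatten_append]
      intro hc; exfalso; omega

theorem easy_spec' (text : String) (number : Int) :
    easy text number = easy_alt text number := by
  unfold easy easy_alt
  rcases (le_or_gt number 0 : number ≤ 0 ∨ number > 0) with hle | hpos
  · have hmax : max number 0 = 0 := by omega
    rw [PySem.List.pyRange_one_eq_nil hle, hmax]
    norm_num [PySem.Int.floordiv, PySem.Int.mod, PySem.List.pyRepeat]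
  · have hmax : max number 0 = number := by omega
    obtain ⟨n, rfl⟩ : ∃ n : Nat, number = (n : Int) :=
      ⟨number.toNat, (Int.toNat_of_nonneg (le_of_lt hpos)).symm⟩
    rw [hmax, easy_loop]
    have hdiv : PySem.Int.floordiv (n : Int) 2 = ((n / 2 : Nat) : Int) := by
      exact_mod_cast PySem.Int.floordiv_natCast n 2
    have hmod : PySem.Int.mod (n : Int) 2 = ((n % 2 : Nat) : Int) :=
      PySem.Int.mod_natCast n 2
    have hrep : PySem.List.pyRepeat (text.toList ++ PySem.Chars.upper text.toList)
        ((n / 2 : Nat) : Int)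
        = (List.replicate (n / 2) (text.toList ++ PySem.Chars.upper text.toList)).flatten := by
      simp [PySem.List.pyRepeat]
      rw [show ((n : Int) / 2).toNat = n / 2 from by omega]
    simp only [hdiv, hmod, hrep]
    rcases Nat.even_or_odd n with he | ho
    · have h2 : n % 2 = 0 := Nat.even_iff.mp he
      simp [h2]
    · have h2 : n % 2 = 1 := Nat.odd_iff.mp ho
      simp [h2]

-- ===== VERDICT (by name: the statement is the Claim_ definition above) =====
theorem easy_spec : Claim_equal_easy := by
  intro text number _
  exact easy_spec' text number
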